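-- pv_equiv track=rewrite | github.com/zmomen/advent_2022 | 2023/day14.py | calculate
-- ===== SOURCE A (Python) =====
-- def calculate(mtx):
--     accum = 0
--     for i in range(len(mtx)):
--         multiplier = len(mtx)
--         for j in range(len(mtx[i])):
--             if mtx[i][j] == 'O':
--                 accum += multiplier
--                 multiplier -= 1
--             elif mtx[i][j] == '#':
--                 multiplier = len(mtx) - j - 1
--     return accum
-- ===== SOURCE B (Python) =====
-- def calculate(mtx):
--     n = len(mtx)
--     total = 0
--     for row in mtx:
--         rest = row
--         start = 0
--         while '#' in rest:
--             i = rest.index('#')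
--             k = rest[:i].count('O')
--             total += k * (n - start) - k * (k - 1) // 2
--             rest = rest[i + 1:]
--             start += i + 1
--         k = rest.count('O')
--         total += k * (n - start) - k * (k - 1) // 2
--     return total
-- ===== Notes on version B (the rewrite author's own statement) =====
-- stated objective: alternative
-- what changed: Instead of A's per-cell multiplier increment/decrement scan, B repeatedly splits each row at the first '#' via index/slicing, counts the 'O's of each hash-free segment with .count, and adds the closed-form contribution k*(n-start) - k*(k-1)//2 per segment.
import Mathlib
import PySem

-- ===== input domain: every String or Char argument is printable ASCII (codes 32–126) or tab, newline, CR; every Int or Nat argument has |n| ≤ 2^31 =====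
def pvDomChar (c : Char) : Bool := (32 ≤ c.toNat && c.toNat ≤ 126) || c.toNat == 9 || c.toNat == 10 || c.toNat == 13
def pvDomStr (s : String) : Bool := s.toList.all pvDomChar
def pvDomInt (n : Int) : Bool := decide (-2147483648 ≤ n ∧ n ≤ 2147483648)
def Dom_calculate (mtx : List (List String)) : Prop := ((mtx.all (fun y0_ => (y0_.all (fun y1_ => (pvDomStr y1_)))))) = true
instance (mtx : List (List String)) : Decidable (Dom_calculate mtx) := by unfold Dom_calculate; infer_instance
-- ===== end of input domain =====

-- B replaces A's per-cell multiplier bookkeeping by splitting each row at '#' and adding a closed-form sum per segment (alternative decomposition, same cost).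

-- ===== PORT A =====
-- inner loop state: (accum, multiplier); the row index i is only used to fetch the row
def calcRowA (n : Int) (row : List String) (st : Int × Int) : Int × Int :=
  (PySem.List.enumerate row).foldl (fun st jc =>
    if jc.2 = "O" then (st.1 + st.2, st.2 - 1)
    else if jc.2 = "#" then (st.1, n - jc.1 - 1)
    else st) st

def calculate (mtx : List (List String)) : Int :=
  mtx.foldl (fun accum row => (calcRowA (mtx.length : Int) row (accum, (mtx.length : Int))).1) 0

-- ===== PORT B =====
-- the `while '#' in rest:` loop of Source B: total contribution of the remainder `rest`
-- of a row whose current segment starts at absolute index `start`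
def rowGoB (n : Int) (rest : List String) (start : Int) : Int :=
  match hidx : PySem.List.index? rest "#" with
  | some i =>
      let k : Int := (PySem.List.slice rest none (some (i : Int))).count "O"   -- rest[:i].count('O')
      k * (n - start) - PySem.Int.floordiv (k * (k - 1)) 2
        + rowGoB n (PySem.List.slice rest (some ((i : Int) + 1)) none) (start + (i : Int) + 1)  -- rest[i+1:]
  | none =>
      let k : Int := rest.count "O"
      k * (n - start) - PySem.Int.floordiv (k * (k - 1)) 2
termination_by rest.length
decreasing_by
  obtain ⟨pre, suf, hsplit, hlen, -⟩ := (PySem.List.index?_eq_some_iff _ _ _).1 hidx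
  have : PySem.List.slice rest (some ((i : Int) + 1)) none = rest.drop (i + 1) := by
    have := PySem.List.slice_from_natCast rest (i + 1)
    push_cast at this
    simpa using this
  rw [this]
  have hi : i < rest.length := by subst hsplit; simp [← hlen]
  simp [List.length_drop]
  omega

def calculate_alt (mtx : List (List String)) : Int :=
  mtx.foldl (fun total row => total + rowGoB (mtx.length : Int) row 0) 0

-- ===== PRECONDITION & SPEC =====
def Spec_calculate (mtx : List (List String)) (out : Int) : Prop := out = calculate_alt mtx
instance (mtx : List (List String)) (out : Int) : Decidable (Spec_calculate mtx out) := by unfold Spec_calculate; infer_instance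

-- ===== CLAIM (what is proved, stated in full; the proofs are below) =====
def Claim_equal_calculate : Prop := ∀ (mtx : List (List String)), Dom_calculate mtx → Spec_calculate mtx (calculate mtx)

-- ===== LEMMAS AND PROOFS =====

-- the closed-form segment term times 2 (k*(k-1) is even, so floordiv is exact)
lemma seg_eq (k : Int) : PySem.Int.floordiv (k * (k - 1)) 2 * 2 = k * (k - 1) := by
  have h2 : (0:Int) < 2 := by norm_num
  rw [PySem.Int.floordiv_eq_ediv_of_pos h2]
  have : (2:Int) ∣ k * (k - 1) := (Int.even_mul_pred_self k).two_dvd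
  exact Int.ediv_mul_cancel this

-- A's inner fold over a hash-free segment, in closed form
lemma foldA_nohash (n : Int) (seg : List String) (hseg : "#" ∉ seg) :
    ∀ (j acc m : Int),
    (PySem.List.enumerate seg j).foldl (fun st jc =>
      if jc.2 = "O" then (st.1 + st.2, st.2 - 1)
      else if jc.2 = "#" then (st.1, n - jc.1 - 1)
      else st) (acc, m)
    = (acc + (seg.count "O" : Int) * m - PySem.Int.floordiv ((seg.count "O" : Int) * ((seg.count "O" : Int) - 1)) 2,
       m - (seg.count "O" : Int)) := by
  induction seg with
  | nil => intro j acc m; simp [PySem.List.enumerate_nil, PySem.Int.floordiv]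
  | cons c rest ih =>
    intro j acc m
    have hcne : c ≠ "#" := fun h => hseg (h ▸ List.mem_cons_self ..)
    have hrest : "#" ∉ rest := fun h => hseg (List.mem_cons_of_mem _ h)
    rw [PySem.List.enumerate_cons]
    simp only [List.foldl_cons]
    by_cases hO : c = "O"
    · simp only [hO, reduceIte]
      rw [ih hrest (j + 1) (acc + m) (m - 1)]
      subst hO
      simp only [List.count_cons_self, Nat.cast_add, Nat.cast_one]
      have e1 := seg_eq (rest.count "O" : Int)
      have e2 := seg_eq ((rest.count "O" : Int) + 1)
      simp only [Prod.mk.injEq]; constructor <;> nlinarith [e1, e2]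
    · simp only [if_neg hO, if_neg hcne]
      rw [ih hrest (j + 1) acc m]
      have hc : (c :: rest).count "O" = rest.count "O" := by
        simp [hO]
      rw [hc]


-- unfolding equations for the well-founded rowGoB
lemma rowGoB_none (n : Int) (rest : List String) (start : Int)
    (h : PySem.List.index? rest "#" = none) :
    rowGoB n rest start
    = (rest.count "O" : Int) * (n - start)
      - PySem.Int.floordiv ((rest.count "O" : Int) * ((rest.count "O" : Int) - 1)) 2 := by
  rw [rowGoB.eq_def]
  split
  · next i heq => rw [h] at heq; cases heq
  · rfl

lemma rowGoB_some (n : Int) (rest : List String) (start : Int) (i : Nat)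
    (h : PySem.List.index? rest "#" = some i) :
    rowGoB n rest start
    = ((PySem.List.slice rest none (some (i : Int))).count "O" : Int) * (n - start)
      - PySem.Int.floordiv (((PySem.List.slice rest none (some (i : Int))).count "O" : Int) * (((PySem.List.slice rest none (some (i : Int))).count "O" : Int) - 1)) 2
      + rowGoB n (PySem.List.slice rest (some ((i : Int) + 1)) none) (start + (i : Int) + 1) := by
  rw [rowGoB.eq_def]
  split
  · next i' heq => rw [h] at heq; cases heq; rfl
  · next heq => rw [h] at heq; cases heq

-- main invariant: A's fold over the remainder starting at absolute position s,
-- with multiplier n - s, accumulates exactly rowGoB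
lemma main_inv (n : Int) :
    ∀ (len : Nat) (rest : List String), rest.length ≤ len → ∀ (s : Nat) (acc : Int),
    ((PySem.List.enumerate rest (s : Int)).foldl (fun st jc =>
      if jc.2 = "O" then (st.1 + st.2, st.2 - 1)
      else if jc.2 = "#" then (st.1, n - jc.1 - 1)
      else st) (acc, n - (s : Int))).1
    = acc + rowGoB n rest (s : Int) := by
  intro len
  induction len with
  | zero =>
    intro rest hlen s acc
    have : rest = [] := List.length_eq_zero_iff.1 (Nat.le_zero.1 hlen)
    subst this
    rw [rowGoB_none n [] (s : Int) (by simp [PySem.List.index?])]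
    simp [PySem.List.enumerate_nil, PySem.Int.floordiv]
  | succ len ih =>
    intro rest hlen s acc
    rcases hidx : PySem.List.index? rest "#" with _ | i
    · -- no '#': single closed-form segment
      have hno : "#" ∉ rest := (PySem.List.index?_eq_none_iff _ _).1 hidx
      rw [foldA_nohash n rest hno (s : Int) acc (n - (s : Int))]
      rw [rowGoB_none n rest (s : Int) hidx]
      simp [add_sub_assoc]
    · -- rest = pre ++ '#' :: suf
      obtain ⟨pre, suf, hsplit, hlenpre, hnopre⟩ := (PySem.List.index?_eq_some_iff _ _ _).1 hidx
      subst hsplit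
      rw [PySem.List.enumerate_append, List.foldl_append]
      rw [foldA_nohash n pre hnopre (s : Int) acc (n - (s : Int))]
      rw [PySem.List.enumerate_cons]
      simp only [List.foldl_cons]
      have hsharp : ("#" : String) ≠ "O" := by decide
      simp only [if_neg hsharp, reduceIte]
      have hstep : n - ((s : Int) + (pre.length : Int)) - 1 = n - ((s + pre.length + 1 : Nat) : Int) := by
        push_cast; ring
      have hsuf : suf.length ≤ len := by
        simp at hlen; omega
      rw [hstep]
      have hrec := ih suf hsuf (s + pre.length + 1) (acc + (pre.count "O" : Int) * (n - (s : Int)) - PySem.Int.floordiv ((pre.count "O" : Int) * ((pre.count "O" : Int) - 1)) 2)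
      have hpos : ((s : Int) + (pre.length : Int) + 1) = ((s + pre.length + 1 : Nat) : Int) := by push_cast; ring
      rw [show (s : Int) + ↑pre.length + 1 = ((s + pre.length + 1 : Nat) : Int) from hpos] at *
      rw [hrec]
      -- unfold rowGoB on pre ++ '#' :: suf
      rw [rowGoB_some n _ (s : Int) i hidx]
      have hslice1 : PySem.List.slice (pre ++ "#" :: suf) none (some (i : Int)) = pre := by
        rw [PySem.List.slice_to_natCast]
        rw [← hlenpre]
        simp
      have hslice2 : PySem.List.slice (pre ++ "#" :: suf) (some ((i : Int) + 1)) none = suf := by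
        have := PySem.List.slice_from_natCast (pre ++ "#" :: suf) (i + 1)
        push_cast at this
        rw [this, ← hlenpre]
        simp [List.drop_append]
      rw [hslice1, hslice2, ← hlenpre]
      push_cast
      ring
  
-- per-row equality, then fold over the rows
lemma row_eq (n : Int) (row : List String) (acc : Int) :
    (calcRowA n row (acc, n)).1 = acc + rowGoB n row 0 := by
  have h := main_inv n row.length row le_rfl 0 acc
  unfold calcRowA
  simpa using h

lemma rows_eq (n : Int) (rows : List (List String)) :
    ∀ acc : Int,
    rows.foldl (fun accum row => (calcRowA n row (accum, n)).1) acc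
    = rows.foldl (fun total row => total + rowGoB n row 0) acc := by
  induction rows with
  | nil => intro acc; rfl
  | cons r rs ihr =>
    intro acc
    simp only [List.foldl_cons]
    rw [row_eq]
    exact ihr _

-- ===== VERDICT (by name: the statement is the Claim_ definition above) =====
theorem calculate_spec : Claim_equal_calculate := by
  intro mtx _
  unfold Spec_calculate calculate calculate_alt
  exact rows_eq (mtx.length : Int) mtx 0
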